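-- pv_equiv track=rewrite | github.com/muhammadzaini213/Tugas-Alpro | Tubes/kosong_bersama.py | search_free_students
-- ===== SOURCE A (Python) =====
-- def search_free_students(free_schedule_data, day, session, original_lines):
--     free_students = []
--     for student, schedule in free_schedule_data.items():
--         if session in schedule.get(day, []):
--             free_students.append(student)
--
--     # Mengambil NIM untuk mahasiswa yang kosong
--     free_students_with_nim = []
--     for student in free_students:
--         matching_lines = [line for line in original_lines if line.startswith(student)]
--         if matching_lines:
--             data = matching_lines[0].strip().split("\t")
--             nim = data[0]
--             free_students_with_nim.append(f"{student} - {nim}")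
--         else:
--             free_students_with_nim.append(f"{student}")
--
--     return free_students_with_nim
-- ===== SOURCE B (Python) =====
-- def search_free_students(free_schedule_data, day, session, original_lines):
--     free_students = [student for student, schedule in free_schedule_data.items()
--                      if session in schedule.get(day, [])]
--     # One pass over the lines: remember the first line that starts with each free student.
--     first_line = {}
--     for line in original_lines:
--         for student in free_students:
--             if student not in first_line and line.startswith(student):
--                 first_line[student] = line
--     result = []
--     for student in free_students:
--         line = first_line.get(student)
--         if line is None:
--             result.append(student)
--         else:
--             nim = line.strip().split("\t")[0]
--             result.append(f"{student} - {nim}")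
--     return result
-- ===== Notes on version B (the rewrite author's own statement) =====
-- stated objective: alternative
-- what changed: Inverts the scan: instead of re-filtering original_lines once per free student, B makes a single pass over the lines recording in a dict the first line that starts with each free student, then formats the result from that dict.
import Mathlib
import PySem

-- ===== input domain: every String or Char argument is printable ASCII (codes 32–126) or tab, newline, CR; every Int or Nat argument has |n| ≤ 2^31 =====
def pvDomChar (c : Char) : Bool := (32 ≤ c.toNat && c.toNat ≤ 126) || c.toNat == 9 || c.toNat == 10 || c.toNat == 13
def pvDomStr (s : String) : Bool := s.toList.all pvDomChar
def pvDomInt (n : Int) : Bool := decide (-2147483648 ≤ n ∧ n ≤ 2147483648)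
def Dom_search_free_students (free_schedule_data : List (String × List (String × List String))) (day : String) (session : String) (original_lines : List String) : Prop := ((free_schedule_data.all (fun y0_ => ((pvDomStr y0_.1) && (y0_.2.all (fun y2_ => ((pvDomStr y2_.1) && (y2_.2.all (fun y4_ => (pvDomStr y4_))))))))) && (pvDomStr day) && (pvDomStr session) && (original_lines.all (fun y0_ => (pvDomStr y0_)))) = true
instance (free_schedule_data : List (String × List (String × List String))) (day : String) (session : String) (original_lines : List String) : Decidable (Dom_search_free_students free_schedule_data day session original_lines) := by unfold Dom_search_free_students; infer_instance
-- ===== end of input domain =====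

-- B inverts the scan: one pass over the lines records the first line starting with each
-- free student in a dict, replacing A's per-student rescans of original_lines (alternative).

-- ===== PORT A =====
-- f"{student} - {nim}" (the same f-string occurs in A and B)
def pvFmt (student nim : String) : String := PySem.Str.join "" [student, " - ", nim]

def search_free_students (free_schedule_data : List (String × List (String × List String))) (day : String) (session : String) (original_lines : List String) : List String :=
  let d := PySem.Dict.ofList free_schedule_data
  let free_students : List String := d.items.foldl (fun acc sp =>
    if ((PySem.Dict.ofList sp.2).getD day []).contains session then acc ++ [sp.1] else acc) []
  free_students.foldl (fun acc student =>
    match original_lines.filter (fun line => PySem.Str.startswith line student) with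
    | [] => acc ++ [student]
    | l :: _ =>
      -- data = l.strip().split("\t"); separator nonempty so split? is `some`, list nonempty so data[0] hits no default
      acc ++ [pvFmt student (PySem.List.pyGetD ((PySem.Str.split? (PySem.Str.strip l) "\t").getD []) 0 "")]) []

-- ===== PORT B =====
-- B's inner loop over the free students for one line:
-- `if student not in first_line and line.startswith(student): first_line[student] = line`
def pvScanLine (free : List String) (d : PySem.Dict String String) (line : String) : PySem.Dict String String :=
  free.foldl (fun d st =>
    if !(d.contains st) && PySem.Str.startswith line st then d.insert st line else d) d

def search_free_students_alt (free_schedule_data : List (String × List (String × List String))) (day : String) (session : String) (original_lines : List String) : List String :=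
  let free_students : List String :=
    ((PySem.Dict.ofList free_schedule_data).items.filter
      (fun sp => ((PySem.Dict.ofList sp.2).getD day []).contains session)).map (fun sp => sp.1)
  let first_line := original_lines.foldl (pvScanLine free_students) PySem.Dict.empty
  free_students.foldl (fun acc student =>
    match first_line.get? student with
    | none => acc ++ [student]
    | some line =>
      acc ++ [pvFmt student (PySem.List.pyGetD ((PySem.Str.split? (PySem.Str.strip line) "\t").getD []) 0 "")]) []

-- ===== PRECONDITION & SPEC =====
def Spec_search_free_students (free_schedule_data : List (String × List (String × List String))) (day : String) (session : String) (original_lines : List String) (out : List String) : Prop := out = search_free_students_alt free_schedule_data day session original_lines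
instance (free_schedule_data : List (String × List (String × List String))) (day : String) (session : String) (original_lines : List String) (out : List String) : Decidable (Spec_search_free_students free_schedule_data day session original_lines out) := by unfold Spec_search_free_students; infer_instance

-- ===== CLAIM (what is proved, stated in full; the proofs are below) =====
def Claim_equal_search_free_students : Prop := ∀ (free_schedule_data : List (String × List (String × List String))) (day : String) (session : String) (original_lines : List String), Dom_search_free_students free_schedule_data day session original_lines → Spec_search_free_students free_schedule_data day session original_lines (search_free_students free_schedule_data day session original_lines)

-- ===== LEMMAS AND PROOFS =====

-- A's per-student body as a function (proof-only)
def pvABody (original_lines : List String) (student : String) : String :=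
  match original_lines.filter (fun line => PySem.Str.startswith line student) with
  | [] => student
  | l :: _ => pvFmt student (PySem.List.pyGetD ((PySem.Str.split? (PySem.Str.strip l) "\t").getD []) 0 "")

-- B's per-student body given the dict lookup (proof-only)
def pvFmtLine (student : String) : Option String → String
  | none => student
  | some l => pvFmt student (PySem.List.pyGetD ((PySem.Str.split? (PySem.Str.strip l) "\t").getD []) 0 "")

lemma step_get? (d : PySem.Dict String String) (line st' st : String) :
    (if !(d.contains st') && PySem.Str.startswith line st' then d.insert st' line else d).get? st
      = if (st' == st) && (!(d.contains st) && PySem.Str.startswith line st) then some line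
        else d.get? st := by
  by_cases h : st' = st
  · subst h
    by_cases hc : d.contains st' <;> by_cases hs : PySem.Chars.startswith line.toList st'.toList <;>
      simp [hc, hs, PySem.Dict.get?_insert_self]
  · by_cases hc : d.contains st' <;> by_cases hs : PySem.Chars.startswith line.toList st'.toList <;>
      simp [hc, hs, beq_iff_eq, h, PySem.Dict.get?_insert_of_ne d line (fun hh => h hh.symm)]

lemma step_contains (d : PySem.Dict String String) (line st' st : String) :
    (if !(d.contains st') && PySem.Str.startswith line st' then d.insert st' line else d).contains st
      = (((st' == st) && (!(d.contains st) && PySem.Str.startswith line st)) || d.contains st) := by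
  rw [PySem.Dict.contains_eq_isSome_get?, step_get?, PySem.Dict.contains_eq_isSome_get?]
  rcases Bool.eq_false_or_eq_true (st' == st) with h1 | h1 <;>
    rcases Bool.eq_false_or_eq_true (PySem.Chars.startswith line.toList st.toList) with h2 | h2 <;>
      rcases Bool.eq_false_or_eq_true (d.get? st).isSome with h3 | h3 <;>
        simp [h1, h2, h3]

-- effect of one line's scan over the free list on a single key
lemma scanLine_get? (line : String) (free : List String) (d : PySem.Dict String String) (st : String) :
    (pvScanLine free d line).get? st
      = if (free.any (fun s => s == st)) && (!(d.contains st) && PySem.Str.startswith line st)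
        then some line else d.get? st := by
  induction free generalizing d with
  | nil => simp [pvScanLine]
  | cons s fs ih =>
    simp only [pvScanLine, List.foldl_cons, List.any_cons] at *
    rw [ih, step_get? d line s st, step_contains d line s st]
    rcases Bool.eq_false_or_eq_true (s == st) with h1 | h1 <;>
      rcases Bool.eq_false_or_eq_true (fs.any (fun s => s == st)) with h2 | h2 <;>
        rcases Bool.eq_false_or_eq_true (d.contains st) with h3 | h3 <;>
          rcases Bool.eq_false_or_eq_true (PySem.Chars.startswith line.toList st.toList) with h4 | h4 <;>
            simp [h1, h2, h3, h4]

-- folding the scan over all lines: a tracked key ends at the first line starting with it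
lemma scanAll_get? (free : List String) (lines : List String) (d : PySem.Dict String String)
    (st : String) (h : free.any (fun s => s == st) = true) :
    (lines.foldl (pvScanLine free) d).get? st
      = ((d.get? st).or (lines.find? (fun l => PySem.Str.startswith l st))) := by
  induction lines generalizing d with
  | nil => simp
  | cons l ls ih =>
    simp only [List.foldl_cons, ih, scanLine_get?, h]
    by_cases hc : d.contains st
    · have hsome : (d.get? st).isSome := by rw [← PySem.Dict.contains_eq_isSome_get?, hc]
      obtain ⟨v, hv⟩ := Option.isSome_iff_exists.mp hsome
      simp [hc, hv]
    · simp only [Bool.not_eq_true] at hc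
      have hnone : d.get? st = none := by
        cases hg : d.get? st with
        | none => rfl
        | some v => rw [PySem.Dict.contains_eq_isSome_get?, hg] at hc; simp at hc
      cases hs : PySem.Str.startswith l st <;>
        · simp only [PySem.Str.startswith_eq] at hs
          simp [hc, hnone, hs]

lemma head?_filter {α : Type} (p : α → Bool) (xs : List α) :
    (xs.filter p).head? = xs.find? p := by
  induction xs with
  | nil => rfl
  | cons x xs ih =>
    by_cases h : p x <;> simp [List.filter_cons, List.find?_cons, h, ih]

-- A's per-student body equals B's dict lookup body, for students in the free list
lemma body_eq (free lines : List String) (st : String) (h : st ∈ free) :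
    pvABody lines st
      = pvFmtLine st ((lines.foldl (pvScanLine free) PySem.Dict.empty).get? st) := by
  rw [scanAll_get? free lines PySem.Dict.empty st
        (List.any_eq_true.mpr ⟨st, h, by simp⟩)]
  rw [PySem.Dict.get?_empty, Option.none_or, ← head?_filter]
  rw [pvABody]
  cases h' : lines.filter (fun line => PySem.Str.startswith line st) with
  | nil => simp [pvFmtLine]
  | cons l t => simp [pvFmtLine]

-- ===== VERDICT (by name: the statement is the Claim_ definition above) =====
theorem search_free_students_spec : Claim_equal_search_free_students := by
  intro fsd day session lines _
  unfold Spec_search_free_students search_free_students search_free_students_alt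
  simp only []
  have hA2 : ∀ (acc : List String) (st : String),
      (match lines.filter (fun line => PySem.Str.startswith line st) with
        | [] => acc ++ [st]
        | l :: _ => acc ++ [pvFmt st (PySem.List.pyGetD ((PySem.Str.split? (PySem.Str.strip l) "\t").getD []) 0 "")])
        = acc ++ [pvABody lines st] := by
    intro acc st
    rw [pvABody]
    cases h : lines.filter (fun line => PySem.Str.startswith line st) <;> simp [h]
  set free := ((PySem.Dict.ofList fsd).items.filter
      (fun sp => ((PySem.Dict.ofList sp.2).getD day []).contains session)).map
      (fun sp => sp.1) with hfree
  have hB2 : ∀ (acc : List String) (st : String),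
      (match (lines.foldl (pvScanLine free) PySem.Dict.empty).get? st with
        | none => acc ++ [st]
        | some line => acc ++ [pvFmt st (PySem.List.pyGetD ((PySem.Str.split? (PySem.Str.strip line) "\t").getD []) 0 "")])
        = acc ++ [pvFmtLine st ((lines.foldl (pvScanLine free) PySem.Dict.empty).get? st)] := by
    intro acc st
    cases h : (lines.foldl (pvScanLine free) PySem.Dict.empty).get? st <;> simp [h, pvFmtLine]
  calc ((PySem.Dict.ofList fsd).items.foldl (fun acc sp =>
          if ((PySem.Dict.ofList sp.2).getD day []).contains session then acc ++ [sp.1] else acc) []).foldl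
        (fun acc student =>
          match lines.filter (fun line => PySem.Str.startswith line student) with
          | [] => acc ++ [student]
          | l :: _ => acc ++ [pvFmt student (PySem.List.pyGetD ((PySem.Str.split? (PySem.Str.strip l) "\t").getD []) 0 "")]) []
      = free.foldl (fun acc student =>
          match lines.filter (fun line => PySem.Str.startswith line student) with
          | [] => acc ++ [student]
          | l :: _ => acc ++ [pvFmt student (PySem.List.pyGetD ((PySem.Str.split? (PySem.Str.strip l) "\t").getD []) 0 "")]) [] := by
        rw [PySem.List.foldl_append_if]
        simp [hfree]
    _ = free.foldl (fun acc student => acc ++ [pvABody lines student]) [] := by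
        exact PySem.List.foldl_congr_mem _ _ _ _ (fun acc st _ => hA2 acc st)
    _ = free.map (fun st => pvABody lines st) := by
        rw [PySem.List.foldl_append_singleton_eq_map]; simp
    _ = free.map (fun st => pvFmtLine st ((lines.foldl (pvScanLine free) PySem.Dict.empty).get? st)) := by
        exact List.map_congr_left (fun st hst => body_eq free lines st hst)
    _ = free.foldl (fun acc st =>
          acc ++ [pvFmtLine st ((lines.foldl (pvScanLine free) PySem.Dict.empty).get? st)]) [] := by
        rw [PySem.List.foldl_append_singleton_eq_map]; simp
    _ = free.foldl (fun acc student =>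
          match (lines.foldl (pvScanLine free) PySem.Dict.empty).get? student with
          | none => acc ++ [student]
          | some line => acc ++ [pvFmt student (PySem.List.pyGetD ((PySem.Str.split? (PySem.Str.strip line) "\t").getD []) 0 "")]) [] := by
        exact PySem.List.foldl_congr_mem _ _ _ _ (fun acc st _ => (hB2 acc st).symm)
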